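-- pv_equiv track=rewrite | github.com/ahluntang/lscale | generator/topology/elements.py | calculate_prefix
-- ===== SOURCE A (Python) =====
-- def calculate_prefix(hosts):
--     """ Calculates prefix based on how many hosts/ip addresses are needed.
--
--     :param hosts: amount of hosts that are needed in the network
--     :return: prefix/networkbits as decimal value
--     """
--     bits = 32
--     host_bits = 0
--     h = 1
--     while h < hosts:
--         h <<= 1  # multiply with 2
--         host_bits += 1
--     networkbits = bits - host_bits
--     return networkbits
-- ===== SOURCE B (Python) =====
-- def calculate_prefix(hosts):
--     """ Calculates prefix based on how many hosts/ip addresses are needed.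
--
--     :param hosts: amount of hosts that are needed in the network
--     :return: prefix/networkbits as decimal value
--     """
--     host_bits = 0 if hosts <= 1 else (hosts - 1).bit_length()
--     return 32 - host_bits
-- ===== Notes on version B (the rewrite author's own statement) =====
-- stated objective: idiomatic
-- what changed: Replaced the doubling while-loop with a closed form: host_bits = (hosts-1).bit_length() (0 for hosts <= 1), i.e. ceil(log2(hosts)) computed directly.
import Mathlib
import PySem

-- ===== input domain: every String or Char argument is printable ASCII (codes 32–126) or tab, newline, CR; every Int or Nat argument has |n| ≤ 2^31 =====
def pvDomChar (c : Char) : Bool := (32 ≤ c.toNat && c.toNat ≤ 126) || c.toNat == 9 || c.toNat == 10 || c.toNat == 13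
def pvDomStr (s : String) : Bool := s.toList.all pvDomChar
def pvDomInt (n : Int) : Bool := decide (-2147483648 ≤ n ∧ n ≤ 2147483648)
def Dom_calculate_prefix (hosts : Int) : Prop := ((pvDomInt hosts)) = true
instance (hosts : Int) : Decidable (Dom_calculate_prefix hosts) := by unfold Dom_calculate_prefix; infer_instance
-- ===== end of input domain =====

-- B replaces A's doubling while-loop by the closed form host_bits = bit_length(hosts-1) (0 for hosts ≤ 1); idiomatic, same values.

-- ===== PORT A =====
-- the 'while h < hosts' loop; the inner '0 < h' test is only a totality guard
-- (h starts at 1 and only doubles, so it is always positive on the call below).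
def calcPrefixLoop (hosts h host_bits : Int) : Int :=
  if h < hosts then
    if 0 < h then calcPrefixLoop hosts (h * 2) (host_bits + 1) else host_bits
  else host_bits
termination_by (hosts - h).toNat
decreasing_by omega

def calculate_prefix (hosts : Int) : Int :=
  let bits : Int := 32
  let host_bits := calcPrefixLoop hosts 1 0
  bits - host_bits

-- ===== PORT B =====
-- (hosts - 1).bit_length() for hosts ≥ 2 is Nat.size of the (nonnegative) value
def calculate_prefix_alt (hosts : Int) : Int :=
  let host_bits : Int := if hosts ≤ 1 then 0 else (Nat.size (hosts - 1).toNat : Int)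
  32 - host_bits

-- ===== PRECONDITION & SPEC =====
def Spec_calculate_prefix (hosts : Int) (out : Int) : Prop := out = calculate_prefix_alt hosts
instance (hosts : Int) (out : Int) : Decidable (Spec_calculate_prefix hosts out) := by unfold Spec_calculate_prefix; infer_instance

-- ===== CLAIM (what is proved, stated in full; the proofs are below) =====
def Claim_equal_calculate_prefix : Prop := ∀ (hosts : Int), Dom_calculate_prefix hosts → Spec_calculate_prefix hosts (calculate_prefix hosts)

-- ===== LEMMAS AND PROOFS =====

-- loop invariant: starting from h = 2^j, the loop adds exactly (size (hosts-1).toNat - j) (truncated Nat subtraction)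
lemma calcPrefixLoop_eq (n : Nat) : ∀ (hosts : Int) (j : Nat) (hb : Int),
    (hosts - 2 ^ j).toNat ≤ n →
    calcPrefixLoop hosts (2 ^ j) hb = hb + ((Nat.size (hosts - 1).toNat - j : Nat) : Int) := by
  induction n with
  | zero =>
    intro hosts j hb hn
    have hpos : (0:Int) < 2 ^ j := by positivity
    rw [calcPrefixLoop]
    have hnotlt : ¬ (2 ^ j : Int) < hosts := by omega
    simp only [hnotlt, if_false]
    have hsz : Nat.size (hosts - 1).toNat ≤ j := by
      rw [Nat.size_le]
      have : ((hosts - 1).toNat : Int) < 2 ^ j := by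
        have h2 : (0:Int) ≤ 2 ^ j := by positivity
        omega
      exact_mod_cast this
    omega
  | succ n ih =>
    intro hosts j hb hn
    rw [calcPrefixLoop]
    by_cases hlt : (2 ^ j : Int) < hosts
    · have hpos : (0:Int) < 2 ^ j := by positivity
      simp only [hlt, if_true, hpos, if_true]
      have hrw : (2:Int) ^ j * 2 = 2 ^ (j + 1) := by ring
      rw [hrw]
      have hrec := ih hosts (j + 1) (hb + 1) (by
        have : (2:Int) ^ (j+1) = 2 ^ j * 2 := by ring
        omega)
      rw [hrec]
      have hsz : j + 1 ≤ Nat.size (hosts - 1).toNat := by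
        have hlow : (2:Int) ^ j ≤ hosts - 1 := by omega
        have hlow' : (2:Nat) ^ j ≤ (hosts - 1).toNat := by
          have h2 : (0:Int) ≤ 2 ^ j := by positivity
          have : ((2:Nat) ^ j : Int) ≤ ((hosts - 1).toNat : Int) := by push_cast; omega
          exact_mod_cast this
        by_contra hc
        have : Nat.size (hosts - 1).toNat ≤ j := by omega
        have := Nat.size_le.mp this
        omega
      omega
    · simp only [hlt, if_false]
      have hpos : (0:Int) < 2 ^ j := by positivity
      have hsz : Nat.size (hosts - 1).toNat ≤ j := by
        rw [Nat.size_le]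
        have : ((hosts - 1).toNat : Int) < 2 ^ j := by omega
        exact_mod_cast this
      omega

-- ===== VERDICT (by name: the statement is the Claim_ definition above) =====
theorem calculate_prefix_spec : Claim_equal_calculate_prefix := by
  intro hosts _
  unfold Spec_calculate_prefix calculate_prefix calculate_prefix_alt
  have h := calcPrefixLoop_eq (hosts - 1).toNat hosts 0 0 (by simp)
  simp only [pow_zero] at h
  rw [h]
  by_cases h1 : hosts ≤ 1
  · have : (hosts - 1).toNat = 0 := by omega
    simp [this, h1, Nat.size_zero]
  · simp [h1]
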